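-- pv_equiv track=rewrite | github.com/jackwayne234/benford-physics | scripts/benford_prime_finder.py | benford_find_n_primes
-- ===== SOURCE A (Python) =====
-- from collections import defaultdict
--
-- def is_prime(n):
--     """Miller-Rabin primality test — deterministic for n < 3.3×10²⁴."""
--     if n < 2:
--         return False
--     if n < 4:
--         return True
--     if n % 2 == 0 or n % 3 == 0:
--         return False
--     for p in [5, 7, 11, 13, 17, 19, 23, 29, 31, 37]:
--         if n == p:
--             return True
--         if n % p == 0:
--             return False
--     d, r = n - 1, 0
--     while d % 2 == 0:
--         d //= 2
--         r += 1
--     for a in [2, 3, 5, 7, 11, 13, 17, 19, 23, 29, 31, 37]: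
--         if a >= n:
--             continue
--         x = pow(a, d, n)
--         if x == 1 or x == n - 1:
--             continue
--         for _ in range(r - 1):
--             x = pow(x, 2, n)
--             if x == n - 1:
--                 break
--         else:
--             return False
--     return True
--
-- def leading_digit(n):
--     """Extract first significant digit."""
--     s = str(abs(n))
--     for ch in s:
--         if ch != '0':
--             return int(ch)
--     return 0
--
-- def benford_find_n_primes(start, end, target_n, density_profile):
--     """
--     Inverse Benford search:
--     1. Divide range into leading-digit buckets
--     2. Rank buckets by prime density (from profile)
--     3. Search highest-density buckets first
--     """
--     checks = 0
--     primes_found = []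
--
--     # Group candidates by leading digit
--     buckets = defaultdict(list)
--     n = start if start % 2 != 0 else start + 1
--     while n <= end:
--         d = leading_digit(n)
--         buckets[d].append(n)
--         n += 2
--
--     # Sort buckets by prime density — highest first
--     # This is the INVERSE: we know which leading digits have more primes
--     sorted_digits = sorted(density_profile.keys(),
--                           key=lambda d: -density_profile[d])
--
--     # Search in density order
--     for d in sorted_digits:
--         if len(primes_found) >= target_n:
--             break
--         for n in buckets.get(d, []):
--             if len(primes_found) >= target_n:
--                 break
--             checks += 1
--             if is_prime(n):
--                 primes_found.append(n)
--
--     return primes_found, checks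
-- ===== SOURCE B (Python) =====
-- def is_prime(n):
--     """Miller-Rabin primality test — deterministic for n < 3.3×10²⁴."""
--     if n < 2:
--         return False
--     if n < 4:
--         return True
--     if n % 2 == 0 or n % 3 == 0:
--         return False
--     for p in [5, 7, 11, 13, 17, 19, 23, 29, 31, 37]:
--         if n == p:
--             return True
--         if n % p == 0:
--             return False
--     d, r = n - 1, 0
--     while d % 2 == 0:
--         d //= 2
--         r += 1
--     for a in [2, 3, 5, 7, 11, 13, 17, 19, 23, 29, 31, 37]:
--         if a >= n:
--             continue
--         x = pow(a, d, n)
--         if x == 1 or x == n - 1: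
--             continue
--         for _ in range(r - 1):
--             x = pow(x, 2, n)
--             if x == n - 1:
--                 break
--         else:
--             return False
--     return True
--
-- def leading_digit(n):
--     """Extract first significant digit."""
--     s = str(abs(n))
--     for ch in s:
--         if ch != '0':
--             return int(ch)
--     return 0
--
-- def benford_find_n_primes(start, end, target_n, density_profile):
--     """Lazy per-digit search: no bucket prescan/grouping; for each digit
--     (highest prime density first) rescan the odd range filtering on the
--     leading digit, stopping as soon as target_n primes are found."""
--     checks = 0
--     primes_found = []
--     first_odd = start if start % 2 != 0 else start + 1
--     for d in sorted(density_profile.keys(), key=lambda d: -density_profile[d]):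
--         if len(primes_found) >= target_n:
--             break
--         if not (0 <= d <= 9):
--             continue  # only 0-9 can ever be a leading digit
--         n = first_odd
--         while n <= end:
--             if leading_digit(n) == d:
--                 if len(primes_found) >= target_n:
--                     break
--                 checks += 1
--                 if is_prime(n):
--                     primes_found.append(n)
--             n += 2
--     return primes_found, checks
-- ===== Notes on version B (the rewrite author's own statement) =====
-- stated objective: alternative
-- what changed: B drops A's full-range prescan that groups every odd candidate into leading-digit buckets (defaultdict) and instead, for each digit in density order, lazily rescans the odd range filtering on the leading digit, exiting as soon as target_n primes are found (no bucket structure, no unconditional O(range) prescan).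
import Mathlib
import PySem

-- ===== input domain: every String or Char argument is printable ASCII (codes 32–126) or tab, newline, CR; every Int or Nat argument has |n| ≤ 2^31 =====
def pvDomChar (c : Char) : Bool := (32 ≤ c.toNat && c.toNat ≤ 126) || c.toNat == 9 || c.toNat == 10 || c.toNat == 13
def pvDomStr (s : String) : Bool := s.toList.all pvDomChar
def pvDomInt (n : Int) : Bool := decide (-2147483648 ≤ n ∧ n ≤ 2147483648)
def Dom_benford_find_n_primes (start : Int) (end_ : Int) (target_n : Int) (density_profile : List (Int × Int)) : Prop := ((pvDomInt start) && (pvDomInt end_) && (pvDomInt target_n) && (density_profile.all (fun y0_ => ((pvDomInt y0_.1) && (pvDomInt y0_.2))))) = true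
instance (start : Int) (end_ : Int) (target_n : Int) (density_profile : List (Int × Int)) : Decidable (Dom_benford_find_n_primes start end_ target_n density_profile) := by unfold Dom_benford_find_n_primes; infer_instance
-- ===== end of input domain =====

-- B replaces A's full-range prescan into leading-digit buckets by a lazy per-digit
-- filtered rescan of the odd range with early exit (objective: alternative).
-- Shared helpers (is_prime, leading_digit): both Python files carry the identical code,
-- so they are ported once and used by both ports.

-- ===== SHARED HELPERS (identical code in Source A and Source B) =====

-- `for p in [5,…,37]: if n == p: return True; if n % p == 0: return False` (fall-through = none)
-- n ≥ 5 here and all divisors are positive, so Lean's `%` equals Python's `%`.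
def pvSmallTrial (n : Int) : List Int → Option Bool
  | [] => none
  | p :: ps =>
    if n == p then some true
    else if n % p == 0 then some false
    else pvSmallTrial n ps

-- `while d % 2 == 0: d //= 2; r += 1` (d = n-1 ≥ 4 at entry; 0 < d is a totality guard
-- Python never needs since d stays positive)
def pvSplit2 (d : Int) (r : Int) : Int × Int :=
  if h : d % 2 == 0 ∧ 0 < d then pvSplit2 (d / 2) (r + 1) else (d, r)
termination_by d.toNat
decreasing_by
  simp only [beq_iff_eq] at h
  omega

-- `for _ in range(r-1): x = pow(x, 2, n); if x == n-1: break else: return False`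
-- returns true iff the loop breaks (so the base passes)
def pvWitnessLoop (n : Int) : Nat → Int → Bool
  | 0, _ => false
  | k + 1, x =>
    let x' := PySem.Int.powMod x 2 n
    if x' == n - 1 then true else pvWitnessLoop n k x'

-- `for a in [2,…,37]: …` — returns false as soon as a base proves n composite
def pvBasesLoop (n d r : Int) : List Int → Bool
  | [] => true
  | a :: as_ =>
    if a ≥ n then pvBasesLoop n d r as_
    else
      let x := PySem.Int.powMod a d.toNat n
      if x == 1 || x == n - 1 then pvBasesLoop n d r as_
      else if pvWitnessLoop n (r - 1).toNat x then pvBasesLoop n d r as_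
      else false

def isPrime (n : Int) : Bool :=
  if n < 2 then false
  else if n < 4 then true
  else if n % 2 == 0 || n % 3 == 0 then false
  else
    match pvSmallTrial n [5, 7, 11, 13, 17, 19, 23, 29, 31, 37] with
    | some b => b
    | none =>
      let dr := pvSplit2 (n - 1) 0
      pvBasesLoop n dr.1 dr.2 [2, 3, 5, 7, 11, 13, 17, 19, 23, 29, 31, 37]

-- `for ch in str(abs(n)): if ch != '0': return int(ch)` — ch is a decimal digit of
-- str(abs(n)), so int(ch) is exactly its digit value (c.toNat - 48)
def pvFirstNonzero : List Char → Int
  | [] => 0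
  | c :: cs => if c ≠ '0' then ((c.toNat : Int) - 48) else pvFirstNonzero cs

def leadingDigit (n : Int) : Int :=
  pvFirstNonzero (PySem.Int.toStr ((n.natAbs : Int))).toList

-- `sorted(density_profile.keys(), key=lambda d: -density_profile[d])`
-- (every key of the dict is present, so d[k] = getD k 0 on the keys)
def pvSortedDigits (density_profile : List (Int × Int)) : List Int :=
  let dd := PySem.Dict.ofList density_profile
  PySem.List.sorted dd.keys (fun d => -(dd.getD d 0))

-- ===== PORT A =====

-- the bucket-building while loop: `while n <= end: buckets[leading_digit(n)].append(n); n += 2`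
-- (each bucket is accumulated in reverse — Python's O(1) list.append — and read back
-- with .reverse where the buckets are consumed, so every bucket holds the same values)
def pvBuildBuckets (end_ : Int) (n : Int) (b : PySem.Dict Int (List Int)) :
    PySem.Dict Int (List Int) :=
  if n ≤ end_ then
    pvBuildBuckets end_ (n + 2) (b.modify (leadingDigit n) [] (n :: ·))
  else b
termination_by (end_ + 1 - n).toNat
decreasing_by omega

-- inner `for n in buckets.get(d, []): …`
def pvInnerA (target_n : Int) : List Int → List Int → Int → List Int × Int
  | [], primes, checks => (primes, checks)
  | n :: rest, primes, checks =>
    if (primes.length : Int) ≥ target_n then (primes, checks)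
    else if isPrime n then pvInnerA target_n rest (primes ++ [n]) (checks + 1)
    else pvInnerA target_n rest primes (checks + 1)

-- outer `for d in sorted_digits: …`
def pvOuterA (target_n : Int) (buckets : PySem.Dict Int (List Int)) :
    List Int → List Int → Int → List Int × Int
  | [], primes, checks => (primes, checks)
  | d :: rest, primes, checks =>
    if (primes.length : Int) ≥ target_n then (primes, checks)
    else
      let pc := pvInnerA target_n ((buckets.getD d []).reverse) primes checks
      pvOuterA target_n buckets rest pc.1 pc.2

def benford_find_n_primes (start : Int) (end_ : Int) (target_n : Int)
    (density_profile : List (Int × Int)) : List Int × Int :=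
  -- `n = start if start % 2 != 0 else start + 1` (Lean's % agrees with Python's for divisor 2)
  let n0 := if start % 2 ≠ 0 then start else start + 1
  let buckets := pvBuildBuckets end_ n0 PySem.Dict.empty
  pvOuterA target_n buckets (pvSortedDigits density_profile) [] 0

-- ===== PORT B =====

-- `while n <= end: if leading_digit(n) == d: (break/check) ; n += 2`
def pvScanB (end_ target_n d : Int) (n : Int) (primes : List Int) (checks : Int) :
    List Int × Int :=
  if h : n ≤ end_ then
    if leadingDigit n == d then
      if (primes.length : Int) ≥ target_n then (primes, checks)
      else if isPrime n then pvScanB end_ target_n d (n + 2) (primes ++ [n]) (checks + 1)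
      else pvScanB end_ target_n d (n + 2) primes (checks + 1)
    else pvScanB end_ target_n d (n + 2) primes checks
  else (primes, checks)
termination_by (end_ + 1 - n).toNat
decreasing_by all_goals omega

-- `for d in sorted(…): …` — `if not (0 <= d <= 9): continue` skips digits that can
-- never be a leading digit
def pvOuterB (end_ target_n n0 : Int) :
    List Int → List Int → Int → List Int × Int
  | [], primes, checks => (primes, checks)
  | d :: rest, primes, checks =>
    if (primes.length : Int) ≥ target_n then (primes, checks)
    else if 0 ≤ d ∧ d ≤ 9 then
      let pc := pvScanB end_ target_n d n0 primes checks
      pvOuterB end_ target_n n0 rest pc.1 pc.2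
    else pvOuterB end_ target_n n0 rest primes checks

def benford_find_n_primes_alt (start : Int) (end_ : Int) (target_n : Int)
    (density_profile : List (Int × Int)) : List Int × Int :=
  let n0 := if start % 2 ≠ 0 then start else start + 1
  pvOuterB end_ target_n n0 (pvSortedDigits density_profile) [] 0

-- ===== PRECONDITION & SPEC =====
def Spec_benford_find_n_primes (start : Int) (end_ : Int) (target_n : Int) (density_profile : List (Int × Int)) (out : List Int × Int) : Prop := out = benford_find_n_primes_alt start end_ target_n density_profile
instance (start : Int) (end_ : Int) (target_n : Int) (density_profile : List (Int × Int)) (out : List Int × Int) : Decidable (Spec_benford_find_n_primes start end_ target_n density_profile out) := by unfold Spec_benford_find_n_primes; infer_instance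

-- ===== CLAIM (what is proved, stated in full; the proofs are below) =====
def Claim_equal_benford_find_n_primes : Prop := ∀ (start : Int) (end_ : Int) (target_n : Int) (density_profile : List (Int × Int)), Dom_benford_find_n_primes start end_ target_n density_profile → Spec_benford_find_n_primes start end_ target_n density_profile (benford_find_n_primes start end_ target_n density_profile)

-- ===== LEMMAS AND PROOFS =====

-- the odd candidates n, n+2, … up to end_ (proof-side description of both loops)
def pvOdds (end_ : Int) (n : Int) : List Int :=
  if h : n ≤ end_ then n :: pvOdds end_ (n + 2) else []
termination_by (end_ + 1 - n).toNat
decreasing_by omega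

-- bucket d of A's prescan = the odd candidates whose leading digit is d
theorem pvBuildBuckets_getD (end_ : Int) (d : Int) :
    ∀ (n : Int) (b : PySem.Dict Int (List Int)),
      (pvBuildBuckets end_ n b).getD d []
        = ((pvOdds end_ n).filter (fun m => leadingDigit m == d)).reverse ++ b.getD d [] := by
  intro n b
  induction n, b using pvBuildBuckets.induct end_ with
  | case1 n b h ih =>
    rw [pvBuildBuckets, pvOdds]
    simp only [if_pos h, ih, PySem.Dict.getD_modify]
    by_cases hd : d = leadingDigit n
    · simp [h, hd]
    · have hne : (leadingDigit n == d) = false := by simp [Ne.symm hd]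
      simp [h, hd, hne]
  | case2 n b h =>
    rw [pvBuildBuckets, pvOdds]
    simp [if_neg h]

-- B's filtered scan = A's inner loop over that bucket
theorem pvScanB_eq_innerA (end_ target_n d : Int) :
    ∀ (n : Int) (primes : List Int) (checks : Int),
      pvScanB end_ target_n d n primes checks
        = pvInnerA target_n ((pvOdds end_ n).filter (fun m => leadingDigit m == d))
            primes checks := by
  intro n primes checks
  induction n, primes, checks using pvScanB.induct end_ target_n d with
  | case1 n p c h hd hlen =>
    rw [pvScanB, pvOdds]
    simp [h, hd, hlen, pvInnerA]
  | case2 n p c h hd hlen hp ih =>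
    rw [pvScanB, pvOdds]
    simp [h, hd, hlen, hp, pvInnerA, ih]
  | case3 n p c h hd hlen hp ih =>
    rw [pvScanB, pvOdds]
    simp [h, hd, hlen, hp, pvInnerA, ih]
  | case4 n p c h hd ih =>
    rw [pvScanB, pvOdds]
    simp [h, hd, ih]
  | case5 n p c h =>
    rw [pvScanB, pvOdds]
    simp [h, pvInnerA]

-- every character str(abs(n)) can contain is a decimal digit
theorem pvToDigitsCore_digits (fuel n : Nat) (acc : List Char)
    (hacc : ∀ c ∈ acc, 48 ≤ c.toNat ∧ c.toNat ≤ 57) :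
    ∀ c ∈ Nat.toDigitsCore 10 fuel n acc, 48 ≤ c.toNat ∧ c.toNat ≤ 57 := by
  induction fuel generalizing n acc with
  | zero => exact hacc
  | succ fuel ih =>
    have hdig : 48 ≤ (Nat.digitChar (n % 10)).toNat ∧ (Nat.digitChar (n % 10)).toNat ≤ 57 := by
      have h10 : n % 10 < 10 := Nat.mod_lt _ (by omega)
      interval_cases h : n % 10 <;> decide
    intro c hc
    rw [Nat.toDigitsCore] at hc
    have hstep : ∀ c' ∈ Nat.digitChar (n % 10) :: acc, 48 ≤ c'.toNat ∧ c'.toNat ≤ 57 := by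
      intro c' hc'
      rcases List.mem_cons.mp hc' with h' | h'
      · exact h' ▸ hdig
      · exact hacc c' h'
    by_cases hz : n / 10 = 0
    · rw [if_pos hz] at hc
      exact hstep c hc
    · rw [if_neg hz] at hc
      exact ih (n / 10) _ hstep c hc

theorem leadingDigit_range (m : Int) : 0 ≤ leadingDigit m ∧ leadingDigit m ≤ 9 := by
  unfold leadingDigit
  rw [PySem.Int.toList_toStr]
  have hch : ∀ c ∈ PySem.Int.toChars (m.natAbs : Int), 48 ≤ c.toNat ∧ c.toNat ≤ 57 := by
    unfold PySem.Int.toChars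
    rw [if_neg (by omega)]
    exact pvToDigitsCore_digits _ _ [] (by simp)
  generalize PySem.Int.toChars (m.natAbs : Int) = cs at hch
  induction cs with
  | nil => simp [pvFirstNonzero]
  | cons c cs ih =>
    have hc := hch c (by simp)
    unfold pvFirstNonzero
    split
    · omega
    · exact ih (fun c hc => hch c (List.mem_cons_of_mem _ hc))

-- for a digit outside 0..9 B's scan is a no-op …
theorem pvScanB_skip (end_ target_n d : Int) (hd : ¬ (0 ≤ d ∧ d ≤ 9)) :
    ∀ (n : Int) (primes : List Int) (checks : Int),
      pvScanB end_ target_n d n primes checks = (primes, checks) := by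
  intro n primes checks
  have hnd : (leadingDigit n == d) = false := by
    have := leadingDigit_range n
    simp only [beq_eq_false_iff_ne, ne_eq]
    omega
  rw [pvScanB]
  split
  · rw [hnd]
    simp only [Bool.false_eq_true, if_false]
    exact pvScanB_skip end_ target_n d hd (n + 2) primes checks
  · rfl
termination_by n => (end_ + 1 - n).toNat
decreasing_by omega

-- … and A's bucket for it is empty
theorem pvFilter_skip (end_ d : Int) (hd : ¬ (0 ≤ d ∧ d ≤ 9)) (n : Int) :
    (pvOdds end_ n).filter (fun m => leadingDigit m == d) = [] := by
  rw [List.filter_eq_nil_iff]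
  intro m _
  have := leadingDigit_range m
  simp only [ne_eq, beq_iff_eq]
  omega

theorem pvOuter_eq (end_ target_n n0 : Int) (digits : List Int) :
    ∀ (primes : List Int) (checks : Int),
      pvOuterA target_n (pvBuildBuckets end_ n0 PySem.Dict.empty) digits primes checks
        = pvOuterB end_ target_n n0 digits primes checks := by
  induction digits with
  | nil => intro p c; rfl
  | cons d rest ih =>
    intro p c
    simp only [pvOuterA, pvOuterB]
    by_cases hlen : (p.length : Int) ≥ target_n
    · simp [hlen]
    · by_cases hd : 0 ≤ d ∧ d ≤ 9
      · simp only [hlen, hd, if_false]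
        rw [pvBuildBuckets_getD, pvScanB_eq_innerA]
        simp [PySem.Dict.getD_empty, ih]
      · simp only [hlen, hd, if_false]
        rw [pvBuildBuckets_getD, pvFilter_skip end_ d hd]
        simp [PySem.Dict.getD_empty, pvInnerA, ih]

-- ===== VERDICT (by name: the statement is the Claim_ definition above) =====
theorem benford_find_n_primes_spec : Claim_equal_benford_find_n_primes := by
  intro start end_ target_n density_profile _
  unfold Spec_benford_find_n_primes benford_find_n_primes benford_find_n_primes_alt
  exact pvOuter_eq _ _ _ _ [] 0
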